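-- pv_equiv track=rewrite | github.com/cmbi/CF-check | preProcessClass.py | getEntriesPerChain
-- ===== SOURCE A (Python) =====
-- def getEntriesPerChain(IDentry):
--     '''
--     splits the entry based on the data for each chain
--     :param IDentry: List containing all information for an ID
--     :return: list of lists with of all information given, split per chain.
--     '''
--
--     chainIndices = [idx for idx, content in enumerate(IDentry) if 'Chain:' in content.replace(' ', '')]
--     indexLen = len(chainIndices)
--     chainEentryList = []
--     if indexLen > 0:
--         for i in range(indexLen - 1):
--             currentChainIdx = chainIndices[i]
--             nextChainIdx = chainIndices[i + 1]
--             chainEentryList.append(IDentry[currentChainIdx:nextChainIdx])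
--         chainEentryList.append(IDentry[chainIndices[(indexLen - 1)]:])
--     return chainEentryList
-- ===== SOURCE B (Python) =====
-- def getEntriesPerChain(IDentry):
--     '''
--     splits the entry based on the data for each chain
--     :param IDentry: List containing all information for an ID
--     :return: list of lists with of all information given, split per chain.
--     '''
--     result = []
--     current = None
--     for content in IDentry:
--         if 'Chain:' in content.replace(' ', ''):
--             if current is not None:
--                 result.append(current)
--             current = [content]
--         elif current is not None:
--             current.append(content)
--     if current is not None:
--         result.append(current)
--     return result
-- ===== Notes on version B (the rewrite author's own statement) =====
-- stated objective: simpler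
-- what changed: Replaced A's two-phase 'collect all marker indices, then slice the list between consecutive indices' with a single pass that maintains the current segment in an accumulator and flushes it at each marker and at the end.
import Mathlib
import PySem

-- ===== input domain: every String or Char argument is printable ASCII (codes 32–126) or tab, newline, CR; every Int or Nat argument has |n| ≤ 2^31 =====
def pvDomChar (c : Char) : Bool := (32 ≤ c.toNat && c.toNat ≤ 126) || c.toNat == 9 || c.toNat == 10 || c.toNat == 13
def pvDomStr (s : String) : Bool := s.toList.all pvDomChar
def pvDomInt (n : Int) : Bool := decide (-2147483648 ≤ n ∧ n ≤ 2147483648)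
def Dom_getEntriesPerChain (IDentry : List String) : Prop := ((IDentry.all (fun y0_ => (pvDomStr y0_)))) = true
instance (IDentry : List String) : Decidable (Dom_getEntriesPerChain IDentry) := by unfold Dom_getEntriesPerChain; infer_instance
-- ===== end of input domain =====

-- B replaces A's "collect marker indices, then slice between consecutive indices" with a single
-- pass keeping the current segment in an accumulator (objective: simpler).

-- ===== PORT A =====
-- 'Chain:' in content.replace(' ', '')  (the marker test both Pythons share verbatim)
def pvChainMarker (content : String) : Bool :=
  PySem.Str.isIn "Chain:" (PySem.Str.replace content " " "")

def getEntriesPerChain (IDentry : List String) : List (List String) :=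
  let chainIndices : List Int :=
    ((PySem.List.enumerate IDentry).filter (fun p => pvChainMarker p.2)).map (fun p => p.1)
  let indexLen : Int := chainIndices.length
  let chainEentryList : List (List String) := []
  if indexLen > 0 then
    let looped := (PySem.List.pyRange 0 (indexLen - 1) 1).foldl (fun acc i =>
      let currentChainIdx := PySem.List.pyGetD chainIndices i 0
      let nextChainIdx := PySem.List.pyGetD chainIndices (i + 1) 0
      acc ++ [PySem.List.slice IDentry (some currentChainIdx) (some nextChainIdx)]) chainEentryList
    looped ++ [PySem.List.slice IDentry (some (PySem.List.pyGetD chainIndices (indexLen - 1) 0)) none]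
  else
    chainEentryList

-- ===== PORT B =====
def getEntriesPerChain_alt (IDentry : List String) : List (List String) :=
  let st := IDentry.foldl (fun (st : List (List String) × Option (List String)) content =>
    if pvChainMarker content then
      match st.2 with
      | none => (st.1, some [content])
      | some cur => (st.1 ++ [cur], some [content])
    else
      match st.2 with
      | none => (st.1, none)
      | some cur => (st.1, some (cur ++ [content]))) ([], none)
  match st.2 with
  | none => st.1
  | some cur => st.1 ++ [cur]

-- ===== PRECONDITION & SPEC =====
def Spec_getEntriesPerChain (IDentry : List String) (out : List (List String)) : Prop := out = getEntriesPerChain_alt IDentry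
instance (IDentry : List String) (out : List (List String)) : Decidable (Spec_getEntriesPerChain IDentry out) := by unfold Spec_getEntriesPerChain; infer_instance

-- ===== CLAIM (what is proved, stated in full; the proofs are below) =====
def Claim_equal_getEntriesPerChain : Prop := ∀ (IDentry : List String), Dom_getEntriesPerChain IDentry → Spec_getEntriesPerChain IDentry (getEntriesPerChain IDentry)

-- ===== LEMMAS AND PROOFS =====

-- canonical recursive description of the split: each segment starts at a marker and runs to the next
def pvSegs (xs : List String) : List (List String) :=
  match xs with
  | [] => []
  | x :: t => if pvChainMarker x then (x :: t.takeWhile (fun y => !pvChainMarker y)) :: pvSegs t else pvSegs t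

-- marker positions, as Nats, built structurally
def pvMk (xs : List String) : List Nat :=
  match xs with
  | [] => []
  | x :: t => if pvChainMarker x then 0 :: (pvMk t).map (· + 1) else (pvMk t).map (· + 1)

-- A's slice-between-consecutive-indices output, recursively over the index list
def pvChunks (l : List Nat) (xs : List String) : List (List String) :=
  match l with
  | [] => []
  | [i] => [xs.drop i]
  | i :: j :: r => ((xs.drop i).take (j - i)) :: pvChunks (j :: r) xs

theorem pvIdxShift (xs : List String) (s : Int) :
    ((PySem.List.enumerate xs s).filter (fun p => pvChainMarker p.2)).map (fun p => p.1)
      = (pvMk xs).map (fun k : Nat => s + (k : Int)) := by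
  induction xs generalizing s with
  | nil => simp [PySem.List.enumerate, pvMk]
  | cons x t ih =>
    rw [PySem.List.enumerate_cons, List.filter_cons]
    by_cases hx : pvChainMarker x = true
    · rw [if_pos (by exact hx), List.map_cons, ih (s + 1)]
      rw [show pvMk (x :: t) = 0 :: (pvMk t).map (· + 1) from by simp [pvMk, hx]]
      rw [List.map_cons, List.map_map]
      refine congrArg₂ _ (by simp) (List.map_congr_left fun k _ => ?_)
      simp only [Function.comp]; push_cast; ring
    · rw [if_neg (by simpa using hx), ih (s + 1)]
      rw [show pvMk (x :: t) = (pvMk t).map (· + 1) from by simp [pvMk, hx]]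
      rw [List.map_map]
      exact List.map_congr_left fun k _ => by simp only [Function.comp]; push_cast; ring

theorem pvGetDMapCast (l : List Nat) (k : Nat) :
    (l.map (fun n : Nat => (n : Int))).getD k 0 = ((l.getD k 0 : Nat) : Int) := by
  induction l generalizing k with
  | nil => rfl
  | cons a t ih =>
    cases k with
    | zero => rfl
    | succ n => exact ih n

theorem pvRangeForm (l : List Nat) (xs : List String) (h : l ≠ []) :
    (List.range (l.length - 1)).map (fun k =>
        PySem.List.slice xs (some ((l.getD k 0 : Nat) : Int)) (some ((l.getD (k + 1) 0 : Nat) : Int)))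
      ++ [PySem.List.slice xs (some ((l.getD (l.length - 1) 0 : Nat) : Int)) none]
      = pvChunks l xs := by
  induction l with
  | nil => exact absurd rfl h
  | cons i t ih =>
    cases t with
    | nil =>
        simp [pvChunks, List.getD, PySem.List.slice_from_natCast]
    | cons j r =>
        have ihr := ih (by simp)
        simp only [List.length_cons, Nat.add_sub_cancel] at ihr ⊢
        rw [List.range_succ_eq_map]
        simp only [List.map_cons, List.map_map]
        have hf : ((fun k => PySem.List.slice xs (some (((i :: j :: r).getD k 0 : Nat) : Int))
              (some (((i :: j :: r).getD (k + 1) 0 : Nat) : Int))) ∘ Nat.succ)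
            = (fun k => PySem.List.slice xs (some (((j :: r).getD k 0 : Nat) : Int))
              (some (((j :: r).getD (k + 1) 0 : Nat) : Int))) := by
          funext k; rfl
        rw [hf]
        simp only [List.cons_append]
        rw [show ((i :: j :: r).getD 0 0) = i from rfl, show ((i :: j :: r).getD 1 0) = j from rfl,
          show ((i :: j :: r).getD (r.length + 1) 0) = ((j :: r).getD r.length 0) from rfl]
        rw [PySem.List.slice_natCast]
        simpa [pvChunks] using ihr

theorem pvA_eq_chunks (xs : List String) : getEntriesPerChain xs = pvChunks (pvMk xs) xs := by
  unfold getEntriesPerChain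
  have hidx : ((PySem.List.enumerate xs 0).filter (fun p => pvChainMarker p.2)).map (fun p => p.1)
      = (pvMk xs).map (fun k : Nat => (k : Int)) := by
    rw [pvIdxShift xs 0]; exact List.map_congr_left fun k _ => by ring
  rw [hidx]
  simp only [List.length_map]
  by_cases hnil : pvMk xs = []
  · simp [hnil, pvChunks]
  · have hlen : 0 < (pvMk xs).length := List.length_pos_iff.mpr hnil
    rw [if_pos (by exact_mod_cast hlen)]
    rw [PySem.List.foldl_append_singleton_eq_map]
    have hr : ((pvMk xs).length : Int) - 1 = (((pvMk xs).length - 1 : Nat) : Int) := by omega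
    rw [hr, PySem.List.pyRange_zero_natCast]
    simp only [List.map_map, List.nil_append]
    have hfun : ∀ k : Nat,
        ((fun i => PySem.List.slice xs (some (PySem.List.pyGetD ((pvMk xs).map (fun k : Nat => (k : Int))) i 0))
            (some (PySem.List.pyGetD ((pvMk xs).map (fun k : Nat => (k : Int))) (i + 1) 0))) ∘ (fun k : Nat => (k : Int))) k
          = PySem.List.slice xs (some (((pvMk xs).getD k 0 : Nat) : Int)) (some (((pvMk xs).getD (k + 1) 0 : Nat) : Int)) := by
      intro k
      have h1 : ((k : Int) + 1) = ((k + 1 : Nat) : Int) := by push_cast; ring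
      simp only [Function.comp, h1, PySem.List.pyGetD_natCast, pvGetDMapCast]
    rw [List.map_congr_left (fun k _ => hfun k)]
    rw [PySem.List.pyGetD_natCast, pvGetDMapCast]
    exact pvRangeForm (pvMk xs) xs hnil

theorem pvChunksShift (l : List Nat) (x : String) (xs : List String) :
    pvChunks (l.map (· + 1)) (x :: xs) = pvChunks l xs := by
  induction l with
  | nil => rfl
  | cons i t ih =>
    cases t with
    | nil => simp [pvChunks]
    | cons j r =>
        simp only [List.map_cons] at ih ⊢
        simp [pvChunks, ih, Nat.add_sub_add_right]

theorem pvMkNilTakeWhile (t : List String) (h : pvMk t = []) :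
    t.takeWhile (fun y => !pvChainMarker y) = t := by
  induction t with
  | nil => rfl
  | cons y r ih =>
    by_cases hy : pvChainMarker y = true
    · simp [pvMk, hy] at h
    · rw [show pvMk (y :: r) = (pvMk r).map (· + 1) from by simp [pvMk, hy]] at h
      rw [List.map_eq_nil_iff] at h
      simp [hy, ih h]

theorem pvMkConsTakeWhile (t : List String) (j : Nat) (r : List Nat) (h : pvMk t = j :: r) :
    t.takeWhile (fun y => !pvChainMarker y) = t.take j := by
  induction t generalizing j r with
  | nil => simp [pvMk] at h
  | cons y s ih =>
    by_cases hy : pvChainMarker y = true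
    · rw [show pvMk (y :: s) = 0 :: (pvMk s).map (· + 1) from by simp [pvMk, hy]] at h
      obtain ⟨hj, -⟩ := List.cons_eq_cons.mp h
      rw [← hj]
      simp [hy]
    · rw [show pvMk (y :: s) = (pvMk s).map (· + 1) from by simp [pvMk, hy]] at h
      cases hs : pvMk s with
      | nil => rw [hs] at h; simp at h
      | cons j' r' =>
          rw [hs, List.map_cons] at h
          obtain ⟨hj, -⟩ := List.cons_eq_cons.mp h
          rw [List.takeWhile_cons, if_pos (by simp [hy]), ih j' r' hs, ← hj, List.take_succ_cons]

theorem pvChunks_eq_segs (xs : List String) : pvChunks (pvMk xs) xs = pvSegs xs := by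
  induction xs with
  | nil => rfl
  | cons x t ih =>
    by_cases hx : pvChainMarker x = true
    · rw [show pvMk (x :: t) = 0 :: (pvMk t).map (· + 1) from by simp [pvMk, hx],
        show pvSegs (x :: t) = (x :: t.takeWhile (fun y => !pvChainMarker y)) :: pvSegs t from by simp [pvSegs, hx]]
      cases hm : pvMk t with
      | nil =>
          rw [hm] at ih
          simp only [List.map_nil]
          simp only [pvChunks] at ih ⊢
          rw [pvMkNilTakeWhile t hm, ← ih]
          simp
      | cons j r =>
          rw [hm] at ih
          simp only [List.map_cons, pvChunks, List.drop_zero, Nat.sub_zero]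
          rw [show ((j + 1) :: List.map (· + 1) r) = ((j :: r).map (· + 1)) from rfl,
            pvChunksShift (j :: r) x t, ih, pvMkConsTakeWhile t j r hm]
          simp [List.take_succ_cons]
    · rw [show pvMk (x :: t) = (pvMk t).map (· + 1) from by simp [pvMk, hx],
        show pvSegs (x :: t) = pvSegs t from by simp [pvSegs, hx]]
      rw [pvChunksShift (pvMk t) x t, ih]

-- B-side invariant: folding with an open current segment
def pvFinish (st : List (List String) × Option (List String)) : List (List String) :=
  match st.2 with
  | none => st.1
  | some cur => st.1 ++ [cur]

def pvStep (st : List (List String) × Option (List String)) (content : String) :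
    List (List String) × Option (List String) :=
  if pvChainMarker content then
    match st.2 with
    | none => (st.1, some [content])
    | some cur => (st.1 ++ [cur], some [content])
  else
    match st.2 with
    | none => (st.1, none)
    | some cur => (st.1, some (cur ++ [content]))

theorem pvB_open (xs : List String) : ∀ (res : List (List String)) (cur : List String),
    pvFinish (xs.foldl pvStep (res, some cur))
      = res ++ (cur ++ xs.takeWhile (fun y => !pvChainMarker y)) :: pvSegs xs := by
  induction xs with
  | nil => intro res cur; simp [pvFinish, pvSegs]
  | cons x t ih =>
    intro res cur
    by_cases hx : pvChainMarker x = true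
    · rw [List.foldl_cons, show pvStep (res, some cur) x = (res ++ [cur], some [x]) from by simp [pvStep, hx]]
      rw [ih (res ++ [cur]) [x]]
      simp [pvSegs, hx]
    · rw [List.foldl_cons, show pvStep (res, some cur) x = (res, some (cur ++ [x])) from by simp [pvStep, hx]]
      rw [ih res (cur ++ [x])]
      simp [pvSegs, hx]

theorem pvB_closed (xs : List String) : ∀ (res : List (List String)),
    pvFinish (xs.foldl pvStep (res, none)) = res ++ pvSegs xs := by
  induction xs with
  | nil => intro res; simp [pvFinish, pvSegs]
  | cons x t ih =>
    intro res
    by_cases hx : pvChainMarker x = true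
    · rw [List.foldl_cons, show pvStep (res, none) x = (res, some [x]) from by simp [pvStep, hx]]
      rw [pvB_open t res [x]]
      simp [pvSegs, hx]
    · rw [List.foldl_cons, show pvStep (res, none) x = (res, none) from by simp [pvStep, hx]]
      rw [ih res]
      simp [pvSegs, hx]

theorem pvB_eq_segs (xs : List String) : getEntriesPerChain_alt xs = pvSegs xs := by
  have h := pvB_closed xs []
  simpa [getEntriesPerChain_alt, pvFinish, pvStep] using h

-- ===== VERDICT (by name: the statement is the Claim_ definition above) =====
theorem getEntriesPerChain_spec : Claim_equal_getEntriesPerChain := by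
  intro IDentry _
  unfold Spec_getEntriesPerChain
  rw [pvA_eq_chunks, pvChunks_eq_segs, pvB_eq_segs]
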